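-- pv_equiv track=rewrite | github.com/Korean3247/Mechanistic-Analysis | authority_analysis/behavior_classifier.py | _label_counts
-- ===== SOURCE A (Python) =====
-- from typing import Any
--
-- def _label_counts(rows: list[dict[str, Any]]) -> dict[str, int]:
--     counts = {"refusal": 0, "compliance": 0, "unknown": 0}
--     for row in rows:
--         label = str(row.get("classifier_label", "unknown")).lower()
--         if label not in counts:
--             label = "unknown"
--         counts[label] += 1
--     return counts
-- ===== SOURCE B (Python) =====
-- def _label_counts(rows):
--     labels = [str(row.get("classifier_label", "unknown")).lower() for row in rows]
--     r = labels.count("refusal")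
--     c = labels.count("compliance")
--     return {"refusal": r, "compliance": c, "unknown": len(rows) - r - c}
-- ===== Notes on version B (the rewrite author's own statement) =====
-- stated objective: idiomatic
-- what changed: B normalizes all labels in one comprehension, reads refusal/compliance off with list.count, and derives unknown by subtraction len(rows)-r-c, eliminating A's mutable counts dict and the per-row membership branch.
import Mathlib
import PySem

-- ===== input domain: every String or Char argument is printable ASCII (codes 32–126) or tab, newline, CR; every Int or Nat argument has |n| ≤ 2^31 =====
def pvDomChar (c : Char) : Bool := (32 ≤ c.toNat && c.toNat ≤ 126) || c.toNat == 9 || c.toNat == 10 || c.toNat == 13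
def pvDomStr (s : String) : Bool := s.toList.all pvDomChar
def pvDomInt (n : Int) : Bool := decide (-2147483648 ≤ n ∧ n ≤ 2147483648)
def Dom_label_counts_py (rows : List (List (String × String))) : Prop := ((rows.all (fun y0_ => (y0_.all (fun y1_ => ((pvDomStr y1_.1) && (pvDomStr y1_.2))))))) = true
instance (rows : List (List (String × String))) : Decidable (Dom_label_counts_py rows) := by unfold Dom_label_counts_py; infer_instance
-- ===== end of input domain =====

-- B replaces A's mutable three-key counts dict and per-row membership branch by a one-pass
-- label normalization, list.count for refusal/compliance, and unknown derived by subtraction (idiomatic).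

-- row.get("classifier_label", "unknown"): first-match lookup in the association list (dict convention)
def pvRowLabel (row : List (String × String)) : String :=
  PySem.Str.lower (((row.find? (fun p => p.1 == "classifier_label")).map Prod.snd).getD "unknown")

-- ===== PORT A =====
def label_counts_py (rows : List (List (String × String))) : List (String × Int) :=
  (rows.foldl (fun counts row =>
      let label := pvRowLabel row
      let label := if counts.contains label then label else "unknown"
      counts.modify label 0 (· + 1))
    (PySem.Dict.mk [("refusal", (0 : Int)), ("compliance", 0), ("unknown", 0)])).items

-- ===== PORT B =====
def label_counts_py_alt (rows : List (List (String × String))) : List (String × Int) :=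
  let labels := rows.map pvRowLabel
  let r : Int := labels.count "refusal"
  let c : Int := labels.count "compliance"
  [("refusal", r), ("compliance", c), ("unknown", (rows.length : Int) - r - c)]

-- ===== PRECONDITION & SPEC =====
def Spec_label_counts_py (rows : List (List (String × String))) (out : List (String × Int)) : Prop := out = label_counts_py_alt rows
instance (rows : List (List (String × String))) (out : List (String × Int)) : Decidable (Spec_label_counts_py rows out) := by unfold Spec_label_counts_py; infer_instance

-- ===== CLAIM (what is proved, stated in full; the proofs are below) =====
def Claim_equal_label_counts_py : Prop := ∀ (rows : List (List (String × String))), Dom_label_counts_py rows → Spec_label_counts_py rows (label_counts_py rows)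

-- ===== LEMMAS AND PROOFS =====

-- One iteration of A's loop on the three-bucket state.
theorem pv_stepA (l : String) (a b c : Int) :
    ((PySem.Dict.mk [("refusal", a), ("compliance", b), ("unknown", c)]).modify
      (if (PySem.Dict.mk [("refusal", a), ("compliance", b), ("unknown", c)]).contains l then l else "unknown")
      0 (· + 1))
    = PySem.Dict.mk [("refusal", if l = "refusal" then a + 1 else a),
                     ("compliance", if l = "compliance" then b + 1 else b),
                     ("unknown", if l ≠ "refusal" ∧ l ≠ "compliance" ∧ l ≠ "unknown" then c + 1 else
                        if l = "unknown" then c + 1 else c)] := by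
  by_cases hr : l = "refusal"
  · subst hr
    simp [PySem.Dict.contains, PySem.Dict.modify, PySem.Dict.getD, PySem.Dict.get?, PySem.Dict.insert]
  · by_cases hc : l = "compliance"
    · subst hc
      simp [PySem.Dict.contains, PySem.Dict.modify, PySem.Dict.getD, PySem.Dict.get?, PySem.Dict.insert]
    · by_cases hu : l = "unknown"
      · subst hu
        simp [PySem.Dict.contains, PySem.Dict.modify, PySem.Dict.getD, PySem.Dict.get?, PySem.Dict.insert]
      · have hr' : ¬ "refusal" = l := fun h => hr h.symm
        have hc' : ¬ "compliance" = l := fun h => hc h.symm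
        have hu' : ¬ "unknown" = l := fun h => hu h.symm
        simp [PySem.Dict.contains, PySem.Dict.modify, PySem.Dict.getD, PySem.Dict.get?,
              PySem.Dict.insert, hr, hc, hu, hr', hc', hu']

-- A's loop from an arbitrary three-bucket state, characterized by counts of normalized labels.
theorem pv_loopA (rows : List (List (String × String))) (a b c : Int) :
    rows.foldl (fun (counts : PySem.Dict String Int) row =>
        let label := pvRowLabel row
        let label := if counts.contains label then label else "unknown"
        counts.modify label 0 (· + 1))
      (PySem.Dict.mk [("refusal", a), ("compliance", b), ("unknown", c)])
    = PySem.Dict.mk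
        [("refusal", a + ((rows.map pvRowLabel).count "refusal" : Int)),
         ("compliance", b + ((rows.map pvRowLabel).count "compliance" : Int)),
         ("unknown", c + ((rows.length : Int) - ((rows.map pvRowLabel).count "refusal" : Int)
                          - ((rows.map pvRowLabel).count "compliance" : Int)))] := by
  induction rows generalizing a b c with
  | nil => simp
  | cons row rest ih =>
    simp only [List.foldl_cons]
    rw [pv_stepA (pvRowLabel row) a b c, ih]
    by_cases hr : pvRowLabel row = "refusal"
    · simp [hr]
      omega
    · by_cases hc : pvRowLabel row = "compliance"
      · simp [hc, List.count_cons]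
        omega
      · by_cases hu : pvRowLabel row = "unknown"
        · simp [hu, List.count_cons]
          omega
        · simp [hr, hc, hu, List.count_cons]
          omega

-- ===== VERDICT (by name: the statement is the Claim_ definition above) =====
theorem label_counts_py_spec : Claim_equal_label_counts_py := by
  intro rows _
  unfold Spec_label_counts_py label_counts_py label_counts_py_alt
  rw [pv_loopA]
  simp
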